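-- pv_equiv track=rewrite | github.com/regularPark/Algorithm | LV. 1/minimum_purse.py | solution
-- ===== SOURCE A (Python) =====
-- def solution(sizes):
--     width = 0
--     height = 0
--     for i in range(len(sizes)):
--         sizes[i].sort()
--         if sizes[i][0] >= width:
--             width = sizes[i][0]
--         if sizes[i][1] >= height:
--             height = sizes[i][1]
--     answer = width * height
--     return answer
-- ===== SOURCE B (Python) =====
-- def solution(sizes):
--     # Note: like A, sorts every sublist of `sizes` in place.
--     for card in sizes:
--         card.sort()
--     # Sort-then-pick: instead of scanning with a running max, sort each
--     # coordinate list descending (seeded with A's baseline 0) and take the head.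
--     width = sorted([0] + [c[0] for c in sizes], reverse=True)[0]
--     height = sorted([0] + [c[1] for c in sizes], reverse=True)[0]
--     return width * height
-- ===== Notes on version B (the rewrite author's own statement) =====
-- stated objective: alternative
-- what changed: Replaces A's single loop with two interleaved running-max accumulators by a sort-then-pick strategy: each coordinate list (seeded with the 0 baseline) is sorted in descending order and the head element is taken as the maximum.
import Mathlib
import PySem

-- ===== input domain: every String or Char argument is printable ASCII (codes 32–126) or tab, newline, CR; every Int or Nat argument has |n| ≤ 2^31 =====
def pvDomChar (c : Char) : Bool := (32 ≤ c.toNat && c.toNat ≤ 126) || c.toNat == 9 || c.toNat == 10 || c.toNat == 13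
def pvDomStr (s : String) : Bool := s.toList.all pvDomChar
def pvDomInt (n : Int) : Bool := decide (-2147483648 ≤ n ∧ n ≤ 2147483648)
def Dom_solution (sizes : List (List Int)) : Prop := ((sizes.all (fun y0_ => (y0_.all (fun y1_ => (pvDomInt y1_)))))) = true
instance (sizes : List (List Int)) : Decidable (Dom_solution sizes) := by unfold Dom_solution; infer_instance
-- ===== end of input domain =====

-- B replaces A's running-max loop by a sort-then-pick strategy: each coordinate list
-- (seeded with A's 0 baseline) is sorted descending and its head taken (objective:
-- alternative). Both A and B sort every sublist of `sizes` in place; the equivalence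
-- proved here is about the return value (the mutation is identical anyway).

-- ===== PORT A =====
def solution (sizes : List (List Int)) : Int :=
  let wh := (PySem.List.pyRange 0 (sizes.length : Int) 1).foldl
    (fun (wh : Int × Int) i =>
      let s := PySem.List.sorted (PySem.List.pyGetD sizes i []) (fun x => x) false
      let a := PySem.List.pyGetD s 0 0
      let b := PySem.List.pyGetD s 1 0
      (if a ≥ wh.1 then a else wh.1, if b ≥ wh.2 then b else wh.2))
    ((0 : Int), (0 : Int))
  wh.1 * wh.2

-- ===== PORT B =====
-- Python's sorted(xs, reverse=True)[0] on a nonempty list is ported as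
-- pyGetD (sorted … true) 0 0 (the list 0 :: … is never empty, so the default is dead).
def solution_alt (sizes : List (List Int)) : Int :=
  let ss := sizes.map (fun c => PySem.List.sorted c (fun x => x) false)
  let width := PySem.List.pyGetD
    (PySem.List.sorted ((0 : Int) :: ss.map (fun c => PySem.List.pyGetD c 0 0)) (fun x => x) true) 0 0
  let height := PySem.List.pyGetD
    (PySem.List.sorted ((0 : Int) :: ss.map (fun c => PySem.List.pyGetD c 1 0)) (fun x => x) true) 0 0
  width * height

-- ===== PRECONDITION & SPEC =====
-- Pre_ excludes exactly the inputs on which Python A raises IndexError (a sublist with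
-- fewer than two elements); Python B raises there too.
def Pre_solution (sizes : List (List Int)) : Prop := ∀ c ∈ sizes, 2 ≤ c.length
instance (sizes : List (List Int)) : Decidable (Pre_solution sizes) := by unfold Pre_solution; infer_instance
def pvWitness_solution : List (List Int) := [[3, 1], [2, 5], [4, 4]]

def Spec_solution (sizes : List (List Int)) (out : Int) : Prop := out = solution_alt sizes
instance (sizes : List (List Int)) (out : Int) : Decidable (Spec_solution sizes out) := by unfold Spec_solution; infer_instance

-- ===== CLAIM (what is proved, stated in full; the proofs are below) =====
def Claim_equal_solution : Prop := ∀ (sizes : List (List Int)), Dom_solution sizes → Pre_solution sizes → Spec_solution sizes (solution sizes)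

-- ===== LEMMAS AND PROOFS =====

-- A's interleaved fold splits into two independent max-folds.
theorem pv_fold_split (l : List (List Int)) (w h : Int) :
    (l.foldl (fun (wh : Int × Int) c =>
        let s := PySem.List.sorted c (fun x => x) false
        let a := PySem.List.pyGetD s 0 0
        let b := PySem.List.pyGetD s 1 0
        (if a ≥ wh.1 then a else wh.1, if b ≥ wh.2 then b else wh.2)) (w, h))
    = (l.foldl (fun w c => max w (PySem.List.pyGetD (PySem.List.sorted c (fun x => x) false) 0 0)) w,
       l.foldl (fun h c => max h (PySem.List.pyGetD (PySem.List.sorted c (fun x => x) false) 1 0)) h) := by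
  induction l generalizing w h with
  | nil => rfl
  | cons c t ih =>
      simp only [List.foldl_cons]
      rw [ih]
      congr 1

theorem pv_foldl_max_init_le (l : List Int) (a : Int) : a ≤ l.foldl max a := by
  induction l generalizing a with
  | nil => simp
  | cons x t ih => exact le_trans (le_max_left _ _) (ih (max a x))

-- foldl max is an upper bound …
theorem pv_foldl_max_le (l : List Int) (a : Int) : ∀ y ∈ l, y ≤ l.foldl max a := by
  induction l generalizing a with
  | nil => intro y hy; cases hy
  | cons x t ih =>
      intro y hy
      rcases List.mem_cons.1 hy with hy | hy
      · subst hy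
        exact le_trans (le_max_right a y) (pv_foldl_max_init_le t (max a y))
      · exact ih (max a x) y hy

-- … and it is attained (it is a or an element of l).
theorem pv_foldl_max_mem (l : List Int) (a : Int) : l.foldl max a = a ∨ l.foldl max a ∈ l := by
  induction l generalizing a with
  | nil => left; rfl
  | cons x t ih =>
      rcases ih (max a x) with h | h
      · simp only [List.foldl_cons, h]
        rcases max_choice a x with hm | hm
        · left; exact hm
        · right; rw [hm]; exact List.mem_cons_self
      · right; exact List.mem_cons_of_mem _ h

-- Head of the descending sort of 0 :: l equals the 0-seeded max-fold of l.
theorem pv_sorted_rev_head (l : List Int) :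
    PySem.List.pyGetD (PySem.List.sorted ((0 : Int) :: l) (fun x => x) true) 0 0
      = l.foldl max 0 := by
  rcases hs : PySem.List.sorted ((0 : Int) :: l) (fun x => x) true with _ | ⟨m, t⟩
  · exact absurd ((PySem.List.sorted_eq_nil_iff _ _ _).1 hs) (by simp)
  · have hub : ∀ y ∈ (0 : Int) :: l, y ≤ m := PySem.List.key_head_sorted_rev_ge _ _ hs
    have hmem : m ∈ (0 : Int) :: l := by
      have := PySem.List.sorted_perm ((0 : Int) :: l) (fun x : Int => x) true
      rw [hs] at this
      exact this.mem_iff.1 List.mem_cons_self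
    have h1 : m ≤ l.foldl max 0 := by
      rcases List.mem_cons.1 hmem with h | h
      · rw [h]; exact pv_foldl_max_init_le l 0
      · exact pv_foldl_max_le l 0 m h
    have h2 : l.foldl max 0 ≤ m := by
      rcases pv_foldl_max_mem l 0 with h | h
      · rw [h]; exact hub 0 List.mem_cons_self
      · exact hub _ (List.mem_cons_of_mem _ h)
    simp [PySem.List.pyGetD, PySem.List.pyGet?, PySem.List.pyIdx?, le_antisymm h1 h2]

theorem solution_spec : Claim_equal_solution := by
  intro sizes _ _
  unfold Spec_solution solution solution_alt
  dsimp only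
  rw [PySem.List.foldl_pyRange_zero_pyGetD' sizes []
        (fun (wh : Int × Int) c =>
          let s := PySem.List.sorted c (fun x => x) false
          let a := PySem.List.pyGetD s 0 0
          let b := PySem.List.pyGetD s 1 0
          (if a ≥ wh.1 then a else wh.1, if b ≥ wh.2 then b else wh.2))
        ((0 : Int), (0 : Int)),
      pv_fold_split, pv_sorted_rev_head, pv_sorted_rev_head]
  simp [List.foldl_map]
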